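-- pv_equiv track=rewrite | github.com/aznan492-cell/company-intel-ai | judge.py | _pick_best_value
-- ===== SOURCE A (Python) =====
-- _NULL_STRINGS = frozenset({"null", "none", "n/a", "na", "not available", "not applicable", "unknown", "not found", "not specified", ""})
--
-- def _normalize(value):
--     """Normalize a field value for comparison."""
--     if value is None:
--         return None
--     v = str(value).strip().lower()
--     if v in _NULL_STRINGS:
--         return None
--     return v if v else None
--
-- def _pick_best_value(field_name: str, values: dict[str, str | None]) -> tuple[str | None, str]:
--     """
--     Pick the best value for a single field from 3 LLM sources.
--
--     Returns:
--         (best_value, source_label)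
--         source_label is one of: "gemini", "groq", "openrouter", "majority", "longest", "only"
--     """
--     # Collect non-null values with their sources (also filter string "null")
--     non_null = {
--         src: val for src, val in values.items()
--         if val is not None
--         and str(val).strip()
--         and str(val).strip().lower() not in _NULL_STRINGS
--     }
--
--     if not non_null:
--         return None, "none"
--
--     if len(non_null) == 1:
--         src, val = next(iter(non_null.items()))
--         return val, src
--
--     # Normalize for comparison
--     normalized = {src: _normalize(val) for src, val in non_null.items()}
--     norm_values = list(normalized.values())
--
--     # Check if all non-null values agree
--     if len(set(norm_values)) == 1:
--         src = next(iter(non_null))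
--         return non_null[src], "majority"
--
--     # Check for 2/3 majority
--     from collections import Counter
--     counts = Counter(norm_values)
--     most_common_val, most_common_count = counts.most_common(1)[0]
--
--     if most_common_count >= 2:
--         # Find a source with this normalized value
--         for src, norm_val in normalized.items():
--             if norm_val == most_common_val:
--                 return non_null[src], "majority"
--
--     # All different → pick the longest (most detailed) value
--     longest_src = max(non_null, key=lambda src: len(str(non_null[src])))
--     return non_null[longest_src], "longest"
-- ===== SOURCE B (Python) =====
-- _NULL_STRINGS = frozenset({"null", "none", "n/a", "na", "not available", "not applicable", "unknown", "not found", "not specified", ""})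
--
-- def _pick_best_value(field_name: str, values: dict[str, str | None]) -> tuple[str | None, str]:
--     """Group non-null sources by normalized value, then decide with one group-max pass."""
--     groups: dict[str, list[tuple[str, str]]] = {}
--     for src, val in values.items():
--         if val is None:
--             continue
--         v = str(val).strip().lower()
--         if v in _NULL_STRINGS:
--             continue
--         groups.setdefault(v, []).append((src, val))
--
--     gl = list(groups.values())
--     if not gl:
--         return None, "none"
--     if len(gl) == 1 == len(gl[0]):
--         src, val = gl[0][0]
--         return val, src
--     best = max(gl, key=len)
--     if len(best) >= 2:
--         return best[0][1], "majority"
--     src, val = max((g[0] for g in gl), key=lambda p: len(p[1]))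
--     return val, "longest"
-- ===== Notes on version B (the rewrite author's own statement) =====
-- stated objective: simpler
-- what changed: B builds one inverted index grouping non-null sources by normalized value and decides everything from a single group-max pass, replacing A's separate all-agree set check, Counter/most_common pass and re-scan of the normalized dict for a matching source.
import Mathlib
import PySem

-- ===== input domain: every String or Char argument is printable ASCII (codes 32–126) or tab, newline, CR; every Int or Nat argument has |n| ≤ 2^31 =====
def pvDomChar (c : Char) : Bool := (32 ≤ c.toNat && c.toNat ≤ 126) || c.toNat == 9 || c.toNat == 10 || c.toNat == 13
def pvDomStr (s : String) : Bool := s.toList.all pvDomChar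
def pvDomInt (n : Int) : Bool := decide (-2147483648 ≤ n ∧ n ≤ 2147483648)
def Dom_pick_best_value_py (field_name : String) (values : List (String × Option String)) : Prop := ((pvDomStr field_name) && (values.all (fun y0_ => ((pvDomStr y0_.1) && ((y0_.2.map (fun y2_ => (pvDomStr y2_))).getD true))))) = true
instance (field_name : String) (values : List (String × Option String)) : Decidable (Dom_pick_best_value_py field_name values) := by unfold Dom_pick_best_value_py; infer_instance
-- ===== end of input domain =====

-- B replaces A's three separate decision passes (all-agree set test, Counter/most_common,
-- re-scan for a matching source) by one inverted index from normalized value to its sources,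
-- decided in a single group-max pass — simpler, same return value on every input.
-- ===== PORT A =====
-- module constant _NULL_STRINGS (shared by both ports, as in the Python module)
def nullStrings : List String :=
  ["null", "none", "n/a", "na", "not available", "not applicable", "unknown", "not found", "not specified", ""]

-- _normalize
def normalizeA (value : Option String) : Option String :=
  match value with
  | none => none
  | some s =>
    let v := PySem.Str.lower (PySem.Str.strip s)
    if nullStrings.contains v then none
    else if v ≠ "" then some v else none

-- one entry of the non_null dict comprehension (the filter condition, in A's order)
def keepA (p : String × Option String) : Option (String × String) :=
  match p.2 with
  | none => none
  | some v =>
    if PySem.Str.strip v = "" then none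
    else if nullStrings.contains (PySem.Str.lower (PySem.Str.strip v)) then none
    else some (p.1, v)

-- non_null = {src: val for src, val in values.items() if ...}  (values is a dict)
def nonNullA (values : List (String × Option String)) : List (String × String) :=
  (PySem.Dict.ofList values).items.filterMap keepA

-- the shared tail: longest_src = max(non_null, key=len); return non_null[longest_src], "longest"
def longestA (non_null : List (String × String)) : Option String × String :=
  match PySem.List.max? non_null (fun p => PySem.Str.len p.2) with
  | some p => (some p.2, "longest")
  | none => (none, "none")  -- unreachable: non_null is nonempty whenever this is evaluated

def pick_best_value_py (field_name : String) (values : List (String × Option String)) : Option String × String :=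
  let non_null := nonNullA values
  match non_null with
  | [] => (none, "none")
  | [(src, val)] => (some val, src)
  | (_, val0) :: _ :: _ =>
    let normalized := non_null.map (fun p => (p.1, normalizeA (some p.2)))
    let norm_values := normalized.map (fun q => q.2)
    if (PySem.Set.ofList norm_values).length = 1 then
      (some val0, "majority")
    else
      let counts := PySem.Dict.counter norm_values
      match PySem.List.max? counts.items (fun q => q.2) with   -- counts.most_common(1)[0]
      | none => (none, "none")  -- unreachable: counts is nonempty here
      | some mc =>
        if 2 ≤ mc.2 then
          -- for src, norm_val in normalized.items(): if norm_val == mc.1: return non_null[src]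
          match non_null.find? (fun p => normalizeA (some p.2) == mc.1) with
          | some p => (some p.2, "majority")
          | none => longestA non_null  -- loop fell through (unreachable)
        else longestA non_null

-- ===== PORT B =====
-- one loop step: group a non-null source under its normalized value
def stepB (g : PySem.Dict String (List (String × String))) (p : String × Option String) :
    PySem.Dict String (List (String × String)) :=
  match p.2 with
  | none => g
  | some val =>
    let v := PySem.Str.lower (PySem.Str.strip val)
    if nullStrings.contains v then g
    else g.modify v [] (fun l => l ++ [(p.1, val)])

def groupsB (values : List (String × Option String)) : PySem.Dict String (List (String × String)) :=
  (PySem.Dict.ofList values).items.foldl stepB PySem.Dict.empty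

def pick_best_value_py_alt (field_name : String) (values : List (String × Option String)) : Option String × String :=
  let gl := (groupsB values).values
  match gl with
  | [] => (none, "none")
  | [[(src, val)]] => (some val, src)
  | _ =>
    match PySem.List.max? gl (fun g => g.length) with   -- best = max(gl, key=len)
    | some best =>
      if 2 ≤ best.length then
        match best with
        | p :: _ => (some p.2, "majority")
        | [] => (none, "none")  -- unreachable: every group is nonempty
      else
        match PySem.List.max? (gl.filterMap List.head?) (fun p => PySem.Str.len p.2) with
        | some p => (some p.2, "longest")
        | none => (none, "none")  -- unreachable
    | none => (none, "none")  -- unreachable: gl is nonempty here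

-- ===== PRECONDITION & SPEC =====
def Spec_pick_best_value_py (field_name : String) (values : List (String × Option String)) (out : Option String × String) : Prop := out = pick_best_value_py_alt field_name values
instance (field_name : String) (values : List (String × Option String)) (out : Option String × String) : Decidable (Spec_pick_best_value_py field_name values out) := by unfold Spec_pick_best_value_py; infer_instance

-- ===== CLAIM (what is proved, stated in full; the proofs are below) =====
def Claim_equal_pick_best_value_py : Prop := ∀ (field_name : String) (values : List (String × Option String)), Dom_pick_best_value_py field_name values → Spec_pick_best_value_py field_name values (pick_best_value_py field_name values)

-- ===== LEMMAS AND PROOFS =====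

-- abbreviations used only by the proofs
def nrm (v : String) : String := PySem.Str.lower (PySem.Str.strip v)

def grp (N : List (String × String)) (k : String) : List (String × String) :=
  N.filter (fun p => nrm p.2 == k)

def setK (N : List (String × String)) : PySem.Set String :=
  PySem.Set.ofList (N.map (fun p => nrm p.2))

-- A's filter condition coincides with B's (strip v = "" implies "" ∈ nullStrings)
lemma keepA_eq (p : String × Option String) :
    keepA p = match p.2 with
      | none => none
      | some v => if nullStrings.contains (nrm v) then none else some (p.1, v) := by
  rcases p with ⟨s, v⟩
  cases v with
  | none => rfl
  | some v =>
    by_cases h : PySem.Str.strip v = ""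
    · simp only [keepA, nrm, h, if_true]
      simp only [show (nullStrings.contains (PySem.Str.lower "")) = true by decide, reduceIte]
    · simp [keepA, nrm, h]

lemma normalizeA_of_kept (v : String) (h : nullStrings.contains (nrm v) = false) :
    normalizeA (some v) = some (nrm v) := by
  have hne : nrm v ≠ "" := by
    intro he
    rw [he] at h
    exact absurd h (by decide)
  simp only [normalizeA]
  rw [show PySem.Str.lower (PySem.Str.strip v) = nrm v from rfl, h]
  simp [hne]

lemma mem_nonNull_not_null (values : List (String × Option String)) (p : String × String)
    (hp : p ∈ nonNullA values) : nullStrings.contains (nrm p.2) = false := by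
  unfold nonNullA at hp
  rw [List.mem_filterMap] at hp
  obtain ⟨a, -, hk⟩ := hp
  rw [keepA_eq] at hk
  rcases a with ⟨s, v⟩
  cases v with
  | none => simp at hk
  | some v =>
    simp at hk
    obtain ⟨hm, rfl⟩ := hk
    simpa using hm

lemma foldl_stepB (L : List (String × Option String))
    (d : PySem.Dict String (List (String × String))) :
    L.foldl stepB d =
      (L.filterMap keepA).foldl (fun g q => g.modify (nrm q.2) [] (fun l => l ++ [q])) d := by
  induction L generalizing d with
  | nil => rfl
  | cons p L ih =>
    rw [List.foldl_cons, List.filterMap_cons, keepA_eq]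
    rcases p with ⟨s, v⟩
    cases v with
    | none => exact ih d
    | some v =>
      by_cases hc : nullStrings.contains (nrm v) = true
      · have h1 : stepB d (s, some v) = d := by
          simp only [stepB]
          rw [show PySem.Str.lower (PySem.Str.strip v) = nrm v from rfl, hc]
          simp
        simp only [hc, if_true, h1]
        exact ih d
      · have hc' : nullStrings.contains (nrm v) = false := by simpa using hc
        have h1 : stepB d (s, some v) = d.modify (nrm v) [] (fun l => l ++ [(s, v)]) := by
          simp only [stepB]
          rw [show PySem.Str.lower (PySem.Str.strip v) = nrm v from rfl, hc']
          simp
        simp only [if_neg hc, h1, List.foldl_cons]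
        exact ih _

-- B's skipping fold over the dict items is the grouping fold over A's non_null list
lemma groupsB_eq (values : List (String × Option String)) :
    groupsB values =
      (nonNullA values).foldl (fun g q => g.modify (nrm q.2) [] (fun l => l ++ [q]))
        PySem.Dict.empty := by
  unfold groupsB nonNullA
  exact foldl_stepB _ _

-- the grouping fold's values, as the list of groups in first-norm order
lemma values_groups (N : List (String × String)) :
    ((N.foldl (fun g q => g.modify (nrm q.2) [] (fun l => l ++ [q]))
        PySem.Dict.empty)).values = (setK N).map (grp N) := by
  have hkeys : (N.foldl (fun g q => g.modify (nrm q.2) [] (fun l => l ++ [q]))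
      PySem.Dict.empty).keys = setK N := by
    have h := PySem.Dict.keys_foldl_modify_key N (fun q => nrm q.2)
      ([] : List (String × String)) (fun _ q l => l ++ [q]) PySem.Dict.empty
    simpa [setK, PySem.Set.update_empty] using h
  have hnd : (N.foldl (fun g q => g.modify (nrm q.2) [] (fun l => l ++ [q]))
      PySem.Dict.empty).keys.Nodup := by
    apply PySem.Dict.nodup_keys_foldl_modify_key
    simp
  have hgetD : ∀ c, (N.foldl (fun g q => g.modify (nrm q.2) [] (fun l => l ++ [q]))
      PySem.Dict.empty).getD c [] = grp N c := by
    intro c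
    have h1 : N.foldl (fun g q => g.modify (nrm q.2) [] (fun l => l ++ [q]))
        PySem.Dict.empty =
        (N.map (fun q => (nrm q.2, q))).foldl
          (fun d p => d.modify p.1 [] (fun l => l ++ [p.2])) PySem.Dict.empty := by
      rw [List.foldl_map]
    rw [h1, PySem.Dict.getD_foldl_modify_append]
    simp [grp, List.filter_map, Function.comp_def]
  rw [PySem.Dict.values_eq_map_keys _ hnd ([] : List (String × String)), hkeys]
  exact List.map_congr_left (fun k _ => hgetD k)

lemma ofList_map_some (l : List String) :
    PySem.Set.ofList (l.map some) = (PySem.Set.ofList l).map some := by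
  induction l using List.reverseRecOn with
  | nil => rfl
  | append_singleton l x ih =>
    rw [List.map_append, List.map_singleton, PySem.Set.ofList_append_singleton,
      PySem.Set.ofList_append_singleton, ih]
    by_cases hx : x ∈ PySem.Set.ofList l
    · rw [PySem.Set.add_of_mem hx, PySem.Set.add_of_mem (List.mem_map_of_mem hx)]
    · have hx' : (some x) ∉ (PySem.Set.ofList l).map some := by
        intro hm
        obtain ⟨a, ha, he⟩ := List.mem_map.1 hm
        exact hx (Option.some.inj he ▸ ha)
      rw [PySem.Set.add_of_not_mem hx, PySem.Set.add_of_not_mem hx', List.map_append,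
        List.map_singleton]

lemma max?_cons_cons {γ κ' : Type} [LT κ'] [DecidableLT κ'] (a b : γ) (l : List γ)
    (key : γ → κ') :
    PySem.List.max? (a :: b :: l) key =
      PySem.List.max? ((if key a < key b then b else a) :: l) key := by
  simp only [PySem.List.max?, List.foldl_cons]
  by_cases h : key a < key b <;> simp [h]

lemma max?_map_pair_cons {κ α β : Type} (f : κ → α) (g : κ → β)
    (keyf : α → Int) (keyg : β → Nat) :
    ∀ (K : List κ) (k0 : κ), (∀ k ∈ k0 :: K, keyf (f k) = (keyg (g k) : Int)) →
    ∃ k ∈ k0 :: K, PySem.List.max? ((k0 :: K).map f) keyf = some (f k) ∧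
      PySem.List.max? ((k0 :: K).map g) keyg = some (g k) := by
  intro K
  induction K with
  | nil =>
    intro k0 _
    exact ⟨k0, List.mem_cons_self .., by simp [PySem.List.max?], by simp [PySem.List.max?]⟩
  | cons x K ih =>
    intro k0 hK
    have h0 := hK k0 (List.mem_cons_self ..)
    have hx := hK x (List.mem_cons_of_mem _ (List.mem_cons_self ..))
    have hiff : (keyf (f k0) < keyf (f x)) ↔ (keyg (g k0) < keyg (g x)) := by
      rw [h0, hx]
      exact_mod_cast Iff.rfl
    simp only [List.map_cons]
    rw [max?_cons_cons (f k0) (f x), max?_cons_cons (g k0) (g x)]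
    have hfe : (if keyf (f k0) < keyf (f x) then f x else f k0) =
        f (if keyg (g k0) < keyg (g x) then x else k0) := by
      rw [if_congr hiff rfl rfl, apply_ite f]
    have hge : (if keyg (g k0) < keyg (g x) then g x else g k0) =
        g (if keyg (g k0) < keyg (g x) then x else k0) := by
      rw [apply_ite g]
    rw [hfe, hge, ← List.map_cons, ← List.map_cons]
    obtain ⟨k, hk, h1, h2⟩ := ih (if keyg (g k0) < keyg (g x) then x else k0) (fun k hk => by
      rcases List.mem_cons.1 hk with rfl | hk
      · split
        · exact hx
        · exact h0
      · exact hK k (List.mem_cons_of_mem _ (List.mem_cons_of_mem _ hk)))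
    refine ⟨k, ?_, h1, h2⟩
    rcases List.mem_cons.1 hk with rfl | hk
    · split <;> simp
    · exact List.mem_cons_of_mem _ (List.mem_cons_of_mem _ hk)

-- the two max? scans over parallel images of K pick the same position
lemma max?_map_pair {κ α β : Type} (K : List κ) (f : κ → α) (g : κ → β)
    (keyf : α → Int) (keyg : β → Nat)
    (h : ∀ k ∈ K, keyf (f k) = (keyg (g k) : Int)) (hne : K ≠ []) :
    ∃ k ∈ K, PySem.List.max? (K.map f) keyf = some (f k) ∧
      PySem.List.max? (K.map g) keyg = some (g k) := by
  rcases K with _ | ⟨k0, K⟩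
  · exact absurd rfl hne
  · exact max?_map_pair_cons f g keyf keyg K k0 h

-- when every group is a singleton the group list is N itself, elementwise boxed
lemma grp_singletons (N : List (String × String))
    (h : ∀ k, (grp N k).length ≤ 1) :
    (setK N).map (grp N) = N.map (fun r => [r]) := by
  induction N with
  | nil => rfl
  | cons r N ih =>
    have hr : grp (r :: N) (nrm r.2) = r :: grp N (nrm r.2) := by
      unfold grp
      rw [List.filter_cons, if_pos (by rw [beq_self_eq_true])]
    have hN0 : grp N (nrm r.2) = [] := by
      have h1 := h (nrm r.2)
      rw [hr] at h1
      simp only [List.length_cons] at h1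
      exact List.eq_nil_of_length_eq_zero (by omega)
    have hnotmem : nrm r.2 ∉ N.map (fun p => nrm p.2) := by
      intro hm
      obtain ⟨m, hmN, hme⟩ := List.mem_map.1 hm
      have hmem : m ∈ grp N (nrm r.2) := by
        unfold grp
        exact List.mem_filter.2 ⟨hmN, by rw [hme]; exact beq_self_eq_true _⟩
      rw [hN0] at hmem
      simp at hmem
    have hsetK : setK (r :: N) = nrm r.2 :: setK N := by
      have hd : PySem.Set.discard (PySem.Set.ofList (N.map (fun p => nrm p.2))) (nrm r.2)
          = setK N := by
        unfold PySem.Set.discard setK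
        apply List.filter_eq_self.2
        intro y hy
        have hyne : y ≠ nrm r.2 := by
          intro he
          exact hnotmem (he ▸ (PySem.Set.mem_ofList _ _).1 hy)
        simpa using hyne
      rw [setK, List.map_cons, PySem.Set.ofList_cons, hd]
    have htail : ∀ k ∈ setK N, grp (r :: N) k = grp N k := by
      intro k hk
      have hkne : (nrm r.2 == k) = false := by
        have : k ≠ nrm r.2 := by
          intro he
          exact hnotmem (he ▸ (PySem.Set.mem_ofList _ _).1 hk)
        simpa using (Ne.symm this)
      unfold grp
      rw [List.filter_cons, if_neg (by rw [hkne]; simp)]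
    have h' : ∀ k, (grp N k).length ≤ 1 := by
      intro k
      have h1 := h k
      unfold grp at h1 ⊢
      rw [List.filter_cons] at h1
      split at h1
      · simp only [List.length_cons] at h1
        omega
      · exact h1
    rw [hsetK, List.map_cons, hr, hN0, List.map_cons]
    rw [List.map_congr_left htail, ih h']

lemma find?_congr_mem {α : Type} (l : List α) (p q : α → Bool)
    (h : ∀ a ∈ l, p a = q a) : l.find? p = l.find? q := by
  induction l with
  | nil => rfl
  | cons a l ih =>
    simp only [List.find?_cons, h a (List.mem_cons_self ..)]
    cases hq : q a
    · exact ih (fun x hx => h x (List.mem_cons_of_mem _ hx))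
    · rfl

-- ===== VERDICT (by name: the statement is the Claim_ definition above) =====
set_option maxHeartbeats 1600000 in
theorem pick_best_value_py_spec : Claim_equal_pick_best_value_py := by
  intro field_name values _
  unfold Spec_pick_best_value_py
  have hB : (groupsB values).values = (setK (nonNullA values)).map (grp (nonNullA values)) := by
    rw [groupsB_eq]
    exact values_groups _
  rcases hN : nonNullA values with _ | ⟨⟨ps, pv⟩, _ | ⟨⟨qs, qv⟩, M⟩⟩
  · rw [hN] at hB
    simp [pick_best_value_py, pick_best_value_py_alt, hN, hB, setK]
  · rw [hN] at hB
    have hgrp1 : grp [(ps, pv)] (nrm pv) = [(ps, pv)] := by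
      unfold grp
      rw [List.filter_cons, if_pos (by rw [beq_self_eq_true])]
      rfl
    have hset1 : setK [(ps, pv)] = [nrm pv] := rfl
    rw [hset1, List.map_cons, List.map_nil] at hB
    simp only [show grp [(ps, pv)] (nrm pv) = grp [(ps, pv)] (nrm (ps, pv).2) from rfl] at hgrp1
    rw [hgrp1] at hB
    simp [pick_best_value_py, pick_best_value_py_alt, hN, hB]
  · rw [hN] at hB
    simp only [pick_best_value_py, pick_best_value_py_alt, hN, hB]
    have hmem : ∀ r ∈ ((ps, pv) :: (qs, qv) :: M : List (String × String)),
        nullStrings.contains (nrm r.2) = false := by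
      intro r hr
      exact mem_nonNull_not_null values r (hN ▸ hr)
    have hnv : (List.map (fun q => q.2)
          (List.map (fun p => (p.1, normalizeA (some p.2))) ((ps, pv) :: (qs, qv) :: M)))
        = List.map some (List.map (fun r => nrm r.2) ((ps, pv) :: (qs, qv) :: M)) := by
      rw [List.map_map, List.map_map]
      apply List.map_congr_left
      intro r hr
      simp only [Function.comp_apply]
      exact normalizeA_of_kept r.2 (hmem r hr)
    rw [hnv, ofList_map_some, List.length_map,
      show PySem.Set.ofList (List.map (fun r => nrm r.2) ((ps, pv) :: (qs, qv) :: M))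
        = setK ((ps, pv) :: (qs, qv) :: M) from rfl]
    by_cases h1 : (setK ((ps, pv) :: (qs, qv) :: M)).length = 1
    · rw [if_pos h1]
      obtain ⟨k0, hk0⟩ := List.length_eq_one_iff.1 h1
      have hall : ∀ r ∈ ((ps, pv) :: (qs, qv) :: M : List (String × String)),
          (nrm r.2 == k0) = true := by
        intro r hr
        have hmemk : nrm r.2 ∈ setK ((ps, pv) :: (qs, qv) :: M) := by
          unfold setK
          rw [PySem.Set.mem_ofList]
          exact List.mem_map.2 ⟨r, hr, rfl⟩
        rw [hk0] at hmemk
        simp only [List.mem_singleton] at hmemk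
        simpa using hmemk
      have hgrp : grp ((ps, pv) :: (qs, qv) :: M) k0 = (ps, pv) :: (qs, qv) :: M := by
        unfold grp
        exact List.filter_eq_self.2 hall
      rw [hk0, List.map_cons, List.map_nil, hgrp]
      split
      next heq => cases heq
      next src val heq => simp at heq
      next =>
        have hmax1 : PySem.List.max?
            [((ps, pv) :: (qs, qv) :: M : List (String × String))] (fun g => g.length)
            = some ((ps, pv) :: (qs, qv) :: M) := rfl
        split
        next best heq2 =>
          rw [hmax1] at heq2
          rw [← Option.some.inj heq2]
          rw [if_pos (show 2 ≤ ((ps, pv) :: (qs, qv) :: M).length from by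
            simp [List.length_cons])]
        next heq2 =>
          rw [hmax1] at heq2
          cases heq2
    · rw [if_neg h1]
      have hK : ∃ k1 k2 Ks, setK ((ps, pv) :: (qs, qv) :: M) = k1 :: k2 :: Ks := by
        have hmem0 : nrm pv ∈ setK ((ps, pv) :: (qs, qv) :: M) := by
          unfold setK
          rw [PySem.Set.mem_ofList]
          exact List.mem_map.2 ⟨(ps, pv), List.mem_cons_self .., rfl⟩
        rcases hsk : setK ((ps, pv) :: (qs, qv) :: M) with _ | ⟨k1, _ | ⟨k2, Ks⟩⟩
        · rw [hsk] at hmem0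
          simp at hmem0
        · exact absurd (by rw [hsk]; rfl) h1
        · exact ⟨k1, k2, Ks, rfl⟩
      obtain ⟨k1, k2, Ks, hsk⟩ := hK
      have hitems : (PySem.Dict.counter
            (List.map some (List.map (fun r => nrm r.2) ((ps, pv) :: (qs, qv) :: M)))).items
          = List.map (fun k => (some k, (((grp ((ps, pv) :: (qs, qv) :: M) k).length : Nat) : Int)))
              (setK ((ps, pv) :: (qs, qv) :: M)) := by
        have hc : ∀ k : String, List.count (some k)
            (List.map some (List.map (fun r => nrm r.2) ((ps, pv) :: (qs, qv) :: M)))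
            = (grp ((ps, pv) :: (qs, qv) :: M) k).length := by
          intro k
          rw [List.count_map_of_injective _ some (Option.some_injective _) k,
            List.count_eq_countP, List.countP_map, List.countP_eq_length_filter]
          rfl
        rw [PySem.Dict.items_counter, ofList_map_some, List.map_map]
        apply List.map_congr_left
        intro k hk
        simp only [Function.comp_apply, hc]
      obtain ⟨kstar, hkmem, hmaxf, hmaxg⟩ := max?_map_pair (setK ((ps, pv) :: (qs, qv) :: M))
        (fun k => (some k, (((grp ((ps, pv) :: (qs, qv) :: M) k).length : Nat) : Int)))
        (grp ((ps, pv) :: (qs, qv) :: M)) (fun q => q.2) List.length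
        (fun k _ => rfl) (by rw [hsk]; simp)
      rw [hitems, hmaxf]
      have hmaxg' := hmaxg
      rw [hsk] at hmaxg'
      rw [List.map_cons, List.map_cons] at hmaxg'
      rw [hsk, List.map_cons, List.map_cons, hmaxg']
      split
      next heq => cases heq
      next mc heq =>
        injection heq with heq
        subst heq
        rw [show ((some kstar, ((grp ((ps, pv) :: (qs, qv) :: M) kstar).length : Int)) :
              Option String × Int).2
            = ((grp ((ps, pv) :: (qs, qv) :: M) kstar).length : Int) from rfl,
          show ((some kstar, ((grp ((ps, pv) :: (qs, qv) :: M) kstar).length : Int)) :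
              Option String × Int).1
            = some kstar from rfl]
        by_cases h2 : 2 ≤ (grp ((ps, pv) :: (qs, qv) :: M) kstar).length
        · rw [if_pos (show (2 : Int) ≤ ((grp ((ps, pv) :: (qs, qv) :: M) kstar).length : Int)
              from by exact_mod_cast h2)]
          have hfind : List.find? (fun p => normalizeA (some p.2) == some kstar)
              ((ps, pv) :: (qs, qv) :: M)
              = (grp ((ps, pv) :: (qs, qv) :: M) kstar).head? := by
            rw [find?_congr_mem _ _ (fun r => nrm r.2 == kstar)
              (fun r hr => by simp [normalizeA_of_kept r.2 (hmem r hr)])]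
            exact Eq.symm List.head?_filter
          rw [hfind]
          rcases hg : grp ((ps, pv) :: (qs, qv) :: M) kstar with _ | ⟨b0, bs⟩
          · rw [hg] at h2
            simp at h2
          · rw [hg] at h2
            rw [List.head?_cons]
            split
            next p heq =>
              rw [show p = b0 from (Option.some.inj heq).symm]
              split
              next heq2 => cases heq2
              next src val heq2 => simp at heq2
              next =>
                split
                next best heq2 =>
                  obtain rfl : b0 :: bs = best := Option.some.inj heq2
                  rw [if_pos h2]
                next heq2 => cases heq2
            next heq => cases heq
        · rw [if_neg (show ¬ (2 : Int) ≤ ((grp ((ps, pv) :: (qs, qv) :: M) kstar).length : Int)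
              from by exact_mod_cast h2)]
          have hall1 : ∀ k, (grp ((ps, pv) :: (qs, qv) :: M) k).length ≤ 1 := by
            intro k
            by_cases hk : k ∈ setK ((ps, pv) :: (qs, qv) :: M)
            · have hle := PySem.List.max?_isMax hmaxg
                (grp ((ps, pv) :: (qs, qv) :: M) k) (List.mem_map_of_mem hk)
              omega
            · have hnil : grp ((ps, pv) :: (qs, qv) :: M) k = [] := by
                unfold grp
                rw [List.filter_eq_nil_iff]
                intro r hr hbeq
                apply hk
                unfold setK
                rw [PySem.Set.mem_ofList]
                exact List.mem_map.2 ⟨r, hr, by simpa using hbeq⟩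
              rw [hnil]
              simp
          have heads : List.filterMap List.head?
              (List.map (grp ((ps, pv) :: (qs, qv) :: M)) (setK ((ps, pv) :: (qs, qv) :: M)))
              = (ps, pv) :: (qs, qv) :: M := by
            rw [grp_singletons _ hall1, List.filterMap_map]
            simp
          rw [hsk, List.map_cons, List.map_cons] at heads
          rw [heads]
          split
          next heq2 => cases heq2
          next src val heq2 => simp at heq2
          next =>
            split
            next best heq2 =>
              rw [if_neg (show ¬ 2 ≤ best.length from by
                rw [← Option.some.inj heq2]
                exact h2)]
              rcases hm : PySem.List.max? ((ps, pv) :: (qs, qv) :: M)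
                  (fun p => PySem.Str.len p.2) with _ | b
              · simp only [longestA]
                rw [hm]
              · simp only [longestA]
                rw [hm]
            next heq2 => cases heq2
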